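-- pv_equiv track=rewrite | github.com/yuyizhilian/TRR-CCM | extract_results.py | conLineToList
-- ===== SOURCE A (Python) =====
-- def conLineToList(line):
--     values = line.split('|')
--     if '' in values:
--         values.remove('')
--     if '' in values:
--         values.remove('')
--     values = [value.strip() for value in values]
--     return values
-- ===== SOURCE B (Python) =====
-- def conLineToList(line):
--     result = []
--     dropped = 0
--     for value in line.split('|'):
--         if value == '' and dropped < 2:
--             dropped += 1
--         else:
--             result.append(value.strip())
--     return result
-- ===== Notes on version B (the rewrite author's own statement) =====
-- stated objective: alternative
-- what changed: Replaced the two membership-test/remove scans plus a final strip comprehension with a single forward pass that skips the first two empty raw fields via a counter and strips as it appends.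
import Mathlib
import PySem

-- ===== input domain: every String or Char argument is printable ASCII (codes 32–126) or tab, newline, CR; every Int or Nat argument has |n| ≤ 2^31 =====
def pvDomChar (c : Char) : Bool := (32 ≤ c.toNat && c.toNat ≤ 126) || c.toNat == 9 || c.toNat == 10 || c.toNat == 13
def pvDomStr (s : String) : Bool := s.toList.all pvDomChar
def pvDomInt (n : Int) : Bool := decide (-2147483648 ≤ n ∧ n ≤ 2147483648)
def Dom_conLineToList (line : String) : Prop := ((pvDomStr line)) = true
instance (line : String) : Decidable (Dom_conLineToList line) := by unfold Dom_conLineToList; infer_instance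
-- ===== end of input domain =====

-- B replaces A's two membership/remove scans plus strip comprehension with one counter-driven pass (alternative decomposition, same cost).

-- ===== PORT A =====
def conLineToList (line : String) : List String :=
  let values := (PySem.Str.split? line "|").getD []   -- sep "|" is nonempty, so split? is some
  let values := match PySem.List.remove? values "" with   -- if '' in values: values.remove('')
    | some v => v
    | none => values
  let values := match PySem.List.remove? values "" with   -- if '' in values: values.remove('')
    | some v => v
    | none => values
  values.map PySem.Str.strip

-- ===== PORT B =====
def conLineToList_alt (line : String) : List String :=
  (((PySem.Str.split? line "|").getD []).foldl
    (fun (st : List String × Nat) value =>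
      if value = "" ∧ st.2 < 2 then (st.1, st.2 + 1)
      else (st.1 ++ [PySem.Str.strip value], st.2))
    ([], 0)).1

-- ===== PRECONDITION & SPEC =====
def Spec_conLineToList (line : String) (out : List String) : Prop := out = conLineToList_alt line
instance (line : String) (out : List String) : Decidable (Spec_conLineToList line out) := by unfold Spec_conLineToList; infer_instance

-- ===== CLAIM (what is proved, stated in full; the proofs are below) =====
def Claim_equal_conLineToList : Prop := ∀ (line : String), Dom_conLineToList line → Spec_conLineToList line (conLineToList line)

-- ===== LEMMAS AND PROOFS =====

/-- remove the first `n` occurrences of `""` (proof-side characterisation). -/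
def pvRemoveN : Nat → List String → List String
  | _, [] => []
  | 0, vs => vs
  | n + 1, v :: vs => if v = "" then pvRemoveN n vs else v :: pvRemoveN (n + 1) vs

lemma pvRemoveN_zero (vs : List String) : pvRemoveN 0 vs = vs := by
  cases vs <;> rfl

def pvStepA (vs : List String) : List String :=
  match PySem.List.remove? vs "" with
  | some v => v
  | none => vs

lemma pvStepA_eq (vs : List String) : pvStepA vs = pvRemoveN 1 vs := by
  induction vs with
  | nil => rfl
  | cons v vs ih =>
    by_cases hv : v = ""
    · subst hv
      simp [pvStepA, pvRemoveN, PySem.List.remove?_cons_self, pvRemoveN_zero]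
    · have := PySem.List.remove?_cons_of_ne (xs := vs) (v := "") (x := v) (by simpa using hv)
      simp only [pvStepA, this, pvRemoveN, if_neg hv] at *
      cases h : PySem.List.remove? vs "" with
      | none => simp [h] at ih ⊢; exact ih
      | some w => simp [h] at ih ⊢; exact ih

lemma pvRemoveN_one_one (vs : List String) : pvRemoveN 1 (pvRemoveN 1 vs) = pvRemoveN 2 vs := by
  induction vs with
  | nil => rfl
  | cons v vs ih =>
    by_cases hv : v = ""
    · subst hv; simp [pvRemoveN, pvRemoveN_zero]
    · simp [pvRemoveN, hv, ih]

lemma pvFold_eq (vs : List String) : ∀ (acc : List String) (d : Nat), d ≤ 2 →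
    (vs.foldl
      (fun (st : List String × Nat) value =>
        if value = "" ∧ st.2 < 2 then (st.1, st.2 + 1)
        else (st.1 ++ [PySem.Str.strip value], st.2))
      (acc, d)).1 = acc ++ (pvRemoveN (2 - d) vs).map PySem.Str.strip := by
  induction vs with
  | nil => intro acc d _; simp [pvRemoveN]
  | cons v vs ih =>
    intro acc d hd
    simp only [List.foldl_cons]
    by_cases hc : v = "" ∧ d < 2
    · rw [if_pos hc]
      obtain ⟨hv, h2⟩ := hc
      subst hv
      have hrm : pvRemoveN (2 - d) ("" :: vs) = pvRemoveN (2 - (d + 1)) vs := by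
        have h : 2 - d = (2 - (d + 1)) + 1 := by omega
        rw [h]; simp [pvRemoveN]
      rw [hrm]
      exact ih acc (d + 1) (by omega)
    · rw [if_neg hc]
      have hrm : pvRemoveN (2 - d) (v :: vs) = v :: pvRemoveN (2 - d) vs := by
        by_cases hv : v = ""
        · subst hv
          have h2 : ¬ d < 2 := fun h => hc ⟨rfl, h⟩
          have hd2 : d = 2 := by omega
          subst hd2
          simp [pvRemoveN_zero]
        · cases h : 2 - d with
          | zero => simp [pvRemoveN_zero]
          | succ n => simp [pvRemoveN, hv]
      rw [hrm]
      rw [ih (acc ++ [PySem.Str.strip v]) d hd]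
      simp

-- ===== VERDICT (by name: the statement is the Claim_ definition above) =====
theorem conLineToList_spec : Claim_equal_conLineToList := by
  intro line _
  show conLineToList line = conLineToList_alt line
  unfold conLineToList conLineToList_alt
  rw [pvFold_eq _ [] 0 (by omega)]
  show ((pvStepA (pvStepA _)).map PySem.Str.strip) = _
  rw [pvStepA_eq, pvStepA_eq, pvRemoveN_one_one]
  simp
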